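-- pv_equiv track=rewrite | github.com/salvatorecalo/temi-d-esame-python-Polito | lab 9/9.1.1.py | eliminaCentrale
-- ===== SOURCE A (Python) =====
-- def eliminaCentrale(lista):
--     for (i,numero) in enumerate(lista):
--         if len(lista) % 2 != 0:
--             if i == len(lista)//2:
--                 lista.pop(i)
--         else:
--             if i == len(lista)//2-1:
--                 lista.pop(i)
--                 lista.pop(i)
--     return lista
-- ===== SOURCE B (Python) =====
-- def eliminaCentrale(lista):
--     n = len(lista)
--     if n % 2 != 0:
--         del lista[n // 2]
--     else:
--         del lista[n // 2 - 1 : n // 2 + 1]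
--     return lista
-- ===== Notes on version B (the rewrite author's own statement) =====
-- stated objective: simpler
-- what changed: Replaces the enumerate scan (which pops during iteration) with closed-form index arithmetic: one del of the single middle element (odd length) or of the two-element central slice (even length), mutating in place just like A.
import Mathlib
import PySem

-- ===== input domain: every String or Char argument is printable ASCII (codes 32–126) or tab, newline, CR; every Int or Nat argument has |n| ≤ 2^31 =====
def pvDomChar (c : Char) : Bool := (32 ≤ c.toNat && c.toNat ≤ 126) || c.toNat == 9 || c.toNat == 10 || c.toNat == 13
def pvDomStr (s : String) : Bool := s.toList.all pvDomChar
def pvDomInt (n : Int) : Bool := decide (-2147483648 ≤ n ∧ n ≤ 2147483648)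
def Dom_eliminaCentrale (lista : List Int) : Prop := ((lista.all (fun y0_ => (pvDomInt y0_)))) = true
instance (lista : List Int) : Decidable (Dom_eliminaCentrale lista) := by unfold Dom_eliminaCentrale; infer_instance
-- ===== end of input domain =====

-- B removes the central element(s) with closed-form index arithmetic (one del of the middle
-- element / central two-element slice) instead of A's enumerate scan that pops mid-iteration;
-- objective: simpler. Both Pythons mutate the argument list in place identically; the theorem
-- is about the returned value (which is the same mutated list).


-- ===== PORT A =====
-- Python's `for (i, numero) in enumerate(lista)` over a list that is popped during iteration
-- is index-based: it runs while i < len(current list). `lista.pop(i)` only ever executes at an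
-- index the branch guard keeps in range, where it equals List.eraseIdx (exact there).
def eliminaStep (l : List Int) (i : Nat) : List Int :=
  if l.length % 2 ≠ 0 then
    if i = l.length / 2 then l.eraseIdx i else l
  else
    if i = l.length / 2 - 1 then (l.eraseIdx i).eraseIdx i else l

theorem eliminaStep_length_le (l : List Int) (i : Nat) :
    (eliminaStep l i).length ≤ l.length := by
  have h1 : (l.eraseIdx i).length ≤ l.length := List.length_eraseIdx_le l i
  have h2 : ((l.eraseIdx i).eraseIdx i).length ≤ (l.eraseIdx i).length :=
    List.length_eraseIdx_le (l.eraseIdx i) i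
  unfold eliminaStep
  split_ifs <;> omega

def eliminaCentraleLoop (l : List Int) (i : Nat) : List Int :=
  if h : i < l.length then
    eliminaCentraleLoop (eliminaStep l i) (i + 1)
  else l
termination_by l.length - i
decreasing_by
  have := eliminaStep_length_le l i
  omega

def eliminaCentrale (lista : List Int) : List Int :=
  eliminaCentraleLoop lista 0

-- ===== PORT B =====
-- `del lista[n//2]` (odd n, index in range) and `del lista[n//2-1 : n//2+1]` (even n) keep the
-- complement of the deleted range: take ++ drop (exact, incl. n = 0 where the slice is empty).
def eliminaCentrale_alt (lista : List Int) : List Int :=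
  let n := lista.length
  if n % 2 ≠ 0 then
    lista.take (n / 2) ++ lista.drop (n / 2 + 1)
  else
    lista.take (n / 2 - 1) ++ lista.drop (n / 2 + 1)

-- ===== PRECONDITION & SPEC =====
def Spec_eliminaCentrale (lista : List Int) (out : List Int) : Prop := out = eliminaCentrale_alt lista
instance (lista : List Int) (out : List Int) : Decidable (Spec_eliminaCentrale lista out) := by unfold Spec_eliminaCentrale; infer_instance

-- ===== CLAIM (what is proved, stated in full; the proofs are below) =====
def Claim_equal_eliminaCentrale : Prop := ∀ (lista : List Int), Dom_eliminaCentrale lista → Spec_eliminaCentrale lista (eliminaCentrale lista)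

-- ===== LEMMAS AND PROOFS =====

-- Once i is past both possible firing indices, the loop changes nothing.
theorem loop_stable (l : List Int) (i : Nat)
    (hodd : l.length % 2 ≠ 0 → l.length / 2 < i)
    (heven : l.length % 2 = 0 → l.length / 2 - 1 < i) :
    eliminaCentraleLoop l i = l := by
  by_cases h : i < l.length
  · rw [eliminaCentraleLoop.eq_def]
    simp only [h, dif_pos]
    have hne1 : l.length % 2 ≠ 0 → i ≠ l.length / 2 := fun ho => by have := hodd ho; omega
    have hne2 : l.length % 2 = 0 → i ≠ l.length / 2 - 1 := fun he => by have := heven he; omega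
    have hstep : eliminaStep l i = l := by
      unfold eliminaStep; split_ifs with h1 h2 h3
      · exact absurd h2 (hne1 h1)
      · rfl
      · exact absurd h3 (hne2 (by omega))
      · rfl
    rw [hstep]
    exact loop_stable l (i + 1) (fun ho => by have := hodd ho; omega)
      (fun he => by have := heven he; omega)
  · rw [eliminaCentraleLoop.eq_def]
    simp [h]
termination_by l.length - i

-- Odd-length phase: up to the middle nothing fires; at i = n/2 the single pop fires and the
-- rest of the loop is stable.
theorem loop_odd (l : List Int) (i : Nat) (hodd : l.length % 2 = 1)
    (hi : i ≤ l.length / 2) :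
    eliminaCentraleLoop l i = l.take (l.length / 2) ++ l.drop (l.length / 2 + 1) := by
  have hlt : l.length / 2 < l.length := by omega
  rcases Nat.lt_or_eq_of_le hi with hlt2 | heq
  · rw [eliminaCentraleLoop.eq_def]
    have h : i < l.length := by omega
    simp only [h, dif_pos]
    have hstep : eliminaStep l i = l := by
      unfold eliminaStep; split_ifs with h1 h2 <;> first | omega | rfl
    rw [hstep]
    exact loop_odd l (i + 1) hodd (by omega)
  · rw [eliminaCentraleLoop.eq_def]
    have h : i < l.length := by omega
    simp only [h, dif_pos]
    have hstep : eliminaStep l i = l.eraseIdx i := by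
      unfold eliminaStep; split_ifs with h1 h2 <;> first | rfl | omega
    rw [hstep]
    have hlen : (l.eraseIdx i).length = l.length - 1 := by
      rw [List.length_eraseIdx_of_lt (by omega)]
    rw [loop_stable (l.eraseIdx i) (i + 1) (fun ho => by omega) (fun he => by omega)]
    rw [List.eraseIdx_eq_take_drop_succ, heq]
termination_by l.length / 2 - i

-- Even-length phase: up to index n/2-1 nothing fires; there the double pop fires and the rest
-- of the loop is stable.
theorem loop_even (l : List Int) (i : Nat) (heven : l.length % 2 = 0)
    (hpos : 0 < l.length) (hi : i ≤ l.length / 2 - 1) :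
    eliminaCentraleLoop l i = l.take (l.length / 2 - 1) ++ l.drop (l.length / 2 + 1) := by
  have hlen2 : 2 ≤ l.length := by omega
  rcases Nat.lt_or_eq_of_le hi with hlt2 | heq
  · rw [eliminaCentraleLoop.eq_def]
    have h : i < l.length := by omega
    simp only [h, dif_pos]
    have hstep : eliminaStep l i = l := by
      unfold eliminaStep; split_ifs with h1 h2 <;> first | omega | rfl
    rw [hstep]
    exact loop_even l (i + 1) heven hpos (by omega)
  · rw [eliminaCentraleLoop.eq_def]
    have h : i < l.length := by omega
    simp only [h, dif_pos]
    have hstep : eliminaStep l i = (l.eraseIdx i).eraseIdx i := by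
      unfold eliminaStep; split_ifs with h1 h2 <;> first | rfl | omega
    rw [hstep]
    have h1 : (l.eraseIdx i).length = l.length - 1 := by
      rw [List.length_eraseIdx_of_lt (by omega)]
    have h2 : ((l.eraseIdx i).eraseIdx i).length = l.length - 2 := by
      rw [List.length_eraseIdx_of_lt (by omega), h1]; omega
    rw [loop_stable ((l.eraseIdx i).eraseIdx i) (i + 1) (fun ho => by omega)
      (fun he => by omega)]
    -- (l.eraseIdx i).eraseIdx i = l.take i ++ l.drop (i + 2)
    rw [List.eraseIdx_eq_take_drop_succ l i, List.eraseIdx_eq_take_drop_succ]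
    have htk : (l.take i ++ l.drop (i + 1)).take i = l.take i := by
      rw [List.take_append_of_le_length (by simp; omega)]
      simp
    have hdr : (l.take i ++ l.drop (i + 1)).drop (i + 1) = l.drop (i + 2) := by
      rw [List.drop_append]
      have hti : (l.take i).length = i := by simp; omega
      rw [hti, List.drop_take]
      simp [show i + 1 - i = 1 from by omega, List.drop_drop]
    rw [htk, hdr]
    have e1 : i = l.length / 2 - 1 := heq
    have e2 : i + 2 = l.length / 2 + 1 := by omega
    rw [← e1, ← e2]
termination_by l.length / 2 - 1 - i

-- ===== VERDICT (by name: the statement is the Claim_ definition above) =====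
theorem eliminaCentrale_spec : Claim_equal_eliminaCentrale := by
  intro lista _
  unfold Spec_eliminaCentrale eliminaCentrale eliminaCentrale_alt
  by_cases hodd : lista.length % 2 = 1
  · rw [loop_odd lista 0 hodd (Nat.zero_le _)]
    simp [hodd]
  · have heven : lista.length % 2 = 0 := by omega
    by_cases hnil : lista.length = 0
    · have hemp : lista = [] := List.eq_nil_of_length_eq_zero hnil
      rw [eliminaCentraleLoop.eq_def]
      simp [hemp]
    · rw [loop_even lista 0 heven (by omega) (Nat.zero_le _)]
      simp [heven]
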